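-- pv_equiv track=rewrite | github.com/shivam1shah-bot/swe-agent | src/services/agents_catalogue/genspec/src/services/approach_evaluator.py | _parse_go_live_plan
-- ===== SOURCE A (Python) =====
-- def _parse_go_live_plan(go_live_text: str) -> tuple:
--     """
--     Parse the go-live plan section.
--
--     Args:
--         go_live_text: Raw go-live plan text
--
--     Returns:
--         Tuple of (go_live_plan, rollout_plan, backward_compatibility, rollback_plan)
--     """
--     go_live_plan = go_live_text
--     rollout_plan = ""
--     backward_compatibility = ""
--     rollback_plan = ""
--
--     # Try to extract subsections
--     sections = {
--         "rollout plan": "rollout_plan",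
--         "backward compatibility": "backward_compatibility",
--         "rollback plan": "rollback_plan"
--     }
--
--     current_section = "go_live_plan"
--     section_content = []
--
--     for line in go_live_text.split('\n'):
--         line = line.strip()
--         if not line:
--             continue
--
--         found_section = False
--         for marker, key in sections.items():
--             if line.lower().startswith(marker) or line.lower() == marker:
--                 # Save previous section
--                 if current_section == "go_live_plan":
--                     go_live_plan = "\n".join(section_content)
--                 elif current_section == "rollout_plan":
--                     rollout_plan = "\n".join(section_content)
--                 elif current_section == "backward_compatibility":
--                     backward_compatibility = "\n".join(section_content)
--                 elif current_section == "rollback_plan":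
--                     rollback_plan = "\n".join(section_content)
--
--                 # Start new section
--                 current_section = key
--                 section_content = []
--                 found_section = True
--                 break
--
--         if not found_section:
--             section_content.append(line)
--
--     # Save the last section
--     if current_section == "go_live_plan":
--         go_live_plan = "\n".join(section_content)
--     elif current_section == "rollout_plan":
--         rollout_plan = "\n".join(section_content)
--     elif current_section == "backward_compatibility":
--         backward_compatibility = "\n".join(section_content)
--     elif current_section == "rollback_plan":
--         rollback_plan = "\n".join(section_content)
--
--     return go_live_plan, rollout_plan, backward_compatibility, rollback_plan
-- ===== SOURCE B (Python) =====
-- def _parse_go_live_plan(go_live_text: str) -> tuple: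
--     """Back-to-front parser: pre-clean the lines, then scan them in REVERSE.
--     Non-marker lines are collected; on a marker line the collected segment is
--     claimed by that marker's section with first-seen-wins (which, scanning
--     backwards, is exactly 'the text after the LAST occurrence of the marker'),
--     and the collector restarts.  What is left at the end is the plan preamble.
--     No current-section state machine and no flush cascades are needed."""
--     def key_of(line):
--         low = line.lower()
--         for m, k in (("rollout plan", "rollout_plan"),
--                      ("backward compatibility", "backward_compatibility"),
--                      ("rollback plan", "rollback_plan")):
--             if low.startswith(m):
--                 return k
--         return None
--
--     lines = [s for s in (l.strip() for l in go_live_text.split('\n')) if s]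
--     rollout = backward = rollback = None
--     acc = []
--     for line in reversed(lines):
--         k = key_of(line)
--         if k is None:
--             acc = [line] + acc
--         else:
--             if k == "rollout_plan" and rollout is None:
--                 rollout = "\n".join(acc)
--             elif k == "backward_compatibility" and backward is None:
--                 backward = "\n".join(acc)
--             elif k == "rollback_plan" and rollback is None:
--                 rollback = "\n".join(acc)
--             acc = []
--     return ("\n".join(acc),
--             rollout if rollout is not None else "",
--             backward if backward is not None else "",
--             rollback if rollback is not None else "")
-- ===== Notes on version B (the rewrite author's own statement) =====
-- stated objective: alternative
-- what changed: Replaces A's forward current-section state machine with its two duplicated four-way flush cascades by a reverse back-to-front scan over the pre-cleaned lines: non-marker lines are collected, a marker line claims the collected segment with first-seen-wins (so each section directly gets the text after the last occurrence of its marker), and the leftover collector is the plan preamble.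
import Mathlib
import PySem

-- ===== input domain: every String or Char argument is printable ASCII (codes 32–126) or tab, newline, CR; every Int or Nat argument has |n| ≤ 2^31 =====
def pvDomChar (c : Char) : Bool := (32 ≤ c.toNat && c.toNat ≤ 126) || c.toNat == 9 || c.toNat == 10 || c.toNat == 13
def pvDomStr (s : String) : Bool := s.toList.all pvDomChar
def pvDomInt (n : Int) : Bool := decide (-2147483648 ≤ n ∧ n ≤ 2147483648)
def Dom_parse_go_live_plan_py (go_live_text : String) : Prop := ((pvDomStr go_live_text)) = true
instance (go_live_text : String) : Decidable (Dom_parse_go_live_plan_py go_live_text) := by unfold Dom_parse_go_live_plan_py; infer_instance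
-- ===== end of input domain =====

-- B replaces A's forward current-section state machine (with its duplicated flush cascades)
-- by a reverse back-to-front scan claiming segments per marker with first-seen-wins (objective: alternative).

-- ===== PORT A =====
def pvSectionsA : List (String × String) :=
  [("rollout plan", "rollout_plan"),
   ("backward compatibility", "backward_compatibility"),
   ("rollback plan", "rollback_plan")]

-- the inner 'for marker, key in sections.items(): … break' loop: first matching key
def pvFirstMatchA (low : String) : List (String × String) → Option String
  | [] => none
  | (m, k) :: rest =>
      if PySem.Str.startswith low m || low == m then some k else pvFirstMatchA low rest

-- the duplicated if-elif save cascade of A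
def pvFlushA (st : String × String × String × String) (cur : String) (content : List String) :
    String × String × String × String :=
  if cur = "go_live_plan" then (PySem.Str.join "\n" content, st.2.1, st.2.2.1, st.2.2.2)
  else if cur = "rollout_plan" then (st.1, PySem.Str.join "\n" content, st.2.2.1, st.2.2.2)
  else if cur = "backward_compatibility" then (st.1, st.2.1, PySem.Str.join "\n" content, st.2.2.2)
  else if cur = "rollback_plan" then (st.1, st.2.1, st.2.2.1, PySem.Str.join "\n" content)
  else st

def pvStepA (acc : (String × String × String × String) × String × List String) (rawline : String) :
    (String × String × String × String) × String × List String :=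
  let line := PySem.Str.strip rawline
  if line = "" then acc
  else
    match pvFirstMatchA (PySem.Str.lower line) pvSectionsA with
    | some key => (pvFlushA acc.1 acc.2.1 acc.2.2, key, [])
    | none => (acc.1, acc.2.1, acc.2.2 ++ [line])

def parse_go_live_plan_py (go_live_text : String) : String × String × String × String :=
  let lines := (PySem.Str.split? go_live_text "\n").getD []   -- sep ≠ "", so split? is always some
  let st := lines.foldl pvStepA ((go_live_text, "", "", ""), "go_live_plan", [])
  pvFlushA st.1 st.2.1 st.2.2

-- ===== PORT B =====
def pvMarkersB : List (String × String) :=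
  [("rollout plan", "rollout_plan"),
   ("backward compatibility", "backward_compatibility"),
   ("rollback plan", "rollback_plan")]

-- B's key_of helper: first marker that low startswith, else None
def pvKeyOfB (low : String) : List (String × String) → Option String
  | [] => none
  | (m, k) :: rest => if PySem.Str.startswith low m then some k else pvKeyOfB low rest

-- one step of B's reverse scan (the loop body for 'for line in reversed(lines)'):
-- state = (acc, rollout, backward, rollback)
def pvStepB (line : String)
    (st : List String × Option String × Option String × Option String) :
    List String × Option String × Option String × Option String :=
  match pvKeyOfB (PySem.Str.lower line) pvMarkersB with
  | none => (line :: st.1, st.2)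
  | some k =>
      if k = "rollout_plan" ∧ st.2.1 = none then
        ([], some (PySem.Str.join "\n" st.1), st.2.2.1, st.2.2.2)
      else if k = "backward_compatibility" ∧ st.2.2.1 = none then
        ([], st.2.1, some (PySem.Str.join "\n" st.1), st.2.2.2)
      else if k = "rollback_plan" ∧ st.2.2.2 = none then
        ([], st.2.1, st.2.2.1, some (PySem.Str.join "\n" st.1))
      else ([], st.2)

def parse_go_live_plan_py_alt (go_live_text : String) : String × String × String × String :=
  let lines := (((PySem.Str.split? go_live_text "\n").getD []).map PySem.Str.strip).filter
                  (fun s => s ≠ "")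
  let p := lines.foldr pvStepB ([], none, none, none)   -- reversed(lines) loop = foldr
  (PySem.Str.join "\n" p.1, p.2.1.getD "", p.2.2.1.getD "", p.2.2.2.getD "")

-- ===== PRECONDITION & SPEC =====
def Spec_parse_go_live_plan_py (go_live_text : String) (out : String × String × String × String) : Prop := out = parse_go_live_plan_py_alt go_live_text
instance (go_live_text : String) (out : String × String × String × String) : Decidable (Spec_parse_go_live_plan_py go_live_text out) := by unfold Spec_parse_go_live_plan_py; infer_instance

-- ===== CLAIM (what is proved, stated in full; the proofs are below) =====
def Claim_equal_parse_go_live_plan_py : Prop := ∀ (go_live_text : String), Dom_parse_go_live_plan_py go_live_text → Spec_parse_go_live_plan_py go_live_text (parse_go_live_plan_py go_live_text)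

-- ===== LEMMAS AND PROOFS =====

-- A's step restricted to already-stripped nonblank lines
def pvStepA' (acc : (String × String × String × String) × String × List String) (line : String) :
    (String × String × String × String) × String × List String :=
  match pvFirstMatchA (PySem.Str.lower line) pvSectionsA with
  | some key => (pvFlushA acc.1 acc.2.1 acc.2.2, key, [])
  | none => (acc.1, acc.2.1, acc.2.2 ++ [line])

-- A's inline strip-and-skip loop equals the loop over the pre-cleaned line list
lemma foldA_preclean (lines : List String)
    (acc : (String × String × String × String) × String × List String) :
    lines.foldl pvStepA acc =
      ((lines.map PySem.Str.strip).filter (fun s => s ≠ "")).foldl pvStepA' acc := by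
  induction lines generalizing acc with
  | nil => rfl
  | cons l rest ih =>
      simp only [List.foldl_cons, List.map_cons, List.filter_cons, pvStepA]
      by_cases h : PySem.Str.strip l = ""
      · simp [h, ih]
      · simp [h, ih, pvStepA']

-- A's marker test 'startswith m || low == m' equals B's plain 'startswith m'
lemma firstMatch_eq (low : String) (l : List (String × String)) :
    pvFirstMatchA low l = pvKeyOfB low l := by
  induction l with
  | nil => rfl
  | cons p rest ih =>
      obtain ⟨m, k⟩ := p
      simp only [pvFirstMatchA, pvKeyOfB, PySem.Str.startswith_eq]
      by_cases h : PySem.Chars.startswith low.toList m.toList = true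
      · simp [h]
      · have hne : low ≠ m := by
          rintro rfl; exact h (by simp [PySem.Chars.startswith_iff])
        simp [h, hne, ih]

lemma keyOf_mem (low key : String) (h : pvKeyOfB low pvMarkersB = some key) :
    key = "rollout_plan" ∨ key = "backward_compatibility" ∨ key = "rollback_plan" := by
  simp only [pvMarkersB, pvKeyOfB] at h
  split_ifs at h <;> simp_all

-- abbreviation for the per-key final value read off B's reverse-scan state
def pvPick (o : Option String) (cur k : String) (content acc : List String) (old : String) :
    String :=
  match o with
  | some v => v
  | none => if cur = k then PySem.Str.join "\n" (content ++ acc) else old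

-- the core invariant: A's forward state machine continued on L equals the values
-- read off B's reverse scan of L, patched with A's entry state for untouched keys
lemma loop_eq (L : List String) (g r b k cur : String) (content : List String)
    (hcur : cur = "go_live_plan" ∨ cur = "rollout_plan" ∨ cur = "backward_compatibility" ∨
            cur = "rollback_plan") :
    (let st := L.foldl pvStepA' ((g, r, b, k), cur, content)
     pvFlushA st.1 st.2.1 st.2.2) =
    (let p := L.foldr pvStepB ([], none, none, none)
     ((if cur = "go_live_plan" then PySem.Str.join "\n" (content ++ p.1) else g),
      pvPick p.2.1 cur "rollout_plan" content p.1 r,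
      pvPick p.2.2.1 cur "backward_compatibility" content p.1 b,
      pvPick p.2.2.2 cur "rollback_plan" content p.1 k)) := by
  induction L generalizing g r b k cur content with
  | nil =>
      simp only [List.foldl_nil, List.foldr_nil, pvPick]
      rcases hcur with h | h | h | h <;> subst h <;> simp [pvFlushA]
  | cons x L ih =>
      simp only [List.foldl_cons, List.foldr_cons]
      rw [show pvStepA' ((g, r, b, k), cur, content) x =
            (match pvFirstMatchA (PySem.Str.lower x) pvSectionsA with
             | some key => (pvFlushA (g, r, b, k) cur content, key, [])
             | none => ((g, r, b, k), cur, content ++ [x])) from rfl]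
      rw [firstMatch_eq, show pvSectionsA = pvMarkersB from rfl]
      cases hm : pvKeyOfB (PySem.Str.lower x) pvMarkersB with
      | none =>
          dsimp only
          rw [ih g r b k cur (content ++ [x]) hcur]
          simp only [pvStepB, hm, pvPick]
          simp [List.append_assoc]
      | some key =>
          dsimp only
          have hkey := keyOf_mem _ _ hm
          have hkcur : key = "go_live_plan" ∨ key = "rollout_plan" ∨
              key = "backward_compatibility" ∨ key = "rollback_plan" := Or.inr hkey
          rw [ih _ _ _ _ key [] hkcur]
          simp only [pvStepB, hm, pvPick]
          -- both sides now mention only the foldr state of L and pvFlushA of the entry state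
          rcases hkey with hk | hk | hk <;> subst hk <;>
            rcases hcur with h | h | h | h <;> subst h <;>
              cases hro : (L.foldr pvStepB ([], none, none, none)).2.1 <;>
                cases hbc : (L.foldr pvStepB ([], none, none, none)).2.2.1 <;>
                  cases hrb : (L.foldr pvStepB ([], none, none, none)).2.2.2 <;>
                    simp [pvFlushA, hro, hbc, hrb]

-- ===== VERDICT (by name: the statement is the Claim_ definition above) =====
theorem parse_go_live_plan_py_spec : Claim_equal_parse_go_live_plan_py := by
  intro t _
  unfold Spec_parse_go_live_plan_py parse_go_live_plan_py parse_go_live_plan_py_alt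
  dsimp only
  rw [foldA_preclean]
  rw [loop_eq _ t "" "" "" "go_live_plan" [] (Or.inl rfl)]
  dsimp only [pvPick]
  cases hro : ((((PySem.Str.split? t "\n").getD []).map PySem.Str.strip).filter
      (fun s => s ≠ "")).foldr pvStepB ([], none, none, none) with
  | mk acc rest =>
      obtain ⟨ro, bc, rb⟩ := rest
      cases ro <;> cases bc <;> cases rb <;> simp
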